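-- pv_equiv track=rewrite | github.com/shushilkumarr/WebMining-Lab | HITS/hits.py | calcSc
-- ===== SOURCE A (Python) =====
-- def getinlinks(page,graph):
--         links=[i for i in range(len(graph)) if graph[i][page]==1]
--         return links
--
-- def calcSc(sc,graph):
--         sc1=[0 for i in range(len(sc))]
--         for i in range(len(sc)):
--                 sc1[i]=0
--                 inlinks=getinlinks(i,graph)
--                 for j in inlinks:
--                         sc1[i]+=sc[j]
--         return sc1
-- ===== SOURCE B (Python) =====
-- def calcSc(sc, graph):
--     # Sparse accumulation: pair scores with rows via zip, fold every 1-entry into a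
--     # dict of per-target totals, then project the dict onto the output list.
--     totals = {}
--     for s, row in zip(sc, graph):
--         for i, v in enumerate(row[:len(sc)]):
--             if v == 1:
--                 totals[i] = totals.get(i, 0) + s
--     return [totals.get(i, 0) for i in range(len(sc))]
-- ===== Notes on version B (the rewrite author's own statement) =====
-- stated objective: alternative
-- what changed: Replaces A's per-target column gather (helper getinlinks builds each target's in-link index list, then sums) with a sparse dict accumulation: scores are paired with their rows by zip (no index arithmetic or sc[j] lookups), every 1-entry adds its row's score into a dict of per-target totals, and a final projection pass reads the dict out into the result list.
import Mathlib
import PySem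

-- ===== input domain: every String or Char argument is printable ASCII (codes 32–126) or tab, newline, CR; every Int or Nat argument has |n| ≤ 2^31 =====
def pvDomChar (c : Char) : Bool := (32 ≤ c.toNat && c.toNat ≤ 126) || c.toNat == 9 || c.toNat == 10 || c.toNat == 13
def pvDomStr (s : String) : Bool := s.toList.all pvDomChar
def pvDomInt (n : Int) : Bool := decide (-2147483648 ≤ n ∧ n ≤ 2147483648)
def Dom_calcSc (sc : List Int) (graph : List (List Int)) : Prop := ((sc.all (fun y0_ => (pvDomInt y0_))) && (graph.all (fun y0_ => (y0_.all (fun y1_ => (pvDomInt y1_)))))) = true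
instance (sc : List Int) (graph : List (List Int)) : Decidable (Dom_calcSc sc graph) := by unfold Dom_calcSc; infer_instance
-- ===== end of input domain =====

-- B replaces A's per-target column gather (helper getinlinks + inner sum) with a sparse
-- dict accumulation over zip(sc, graph) plus a final projection pass; alternative decomposition.

-- ===== PORT A =====
-- helper getinlinks: rows i with graph[i][page] == 1 (reads are in range under Pre_, so getD is exact)
def getinlinksL (page : Nat) (graph : List (List Int)) : List Nat :=
  (List.range graph.length).filter (fun i => (graph.getD i []).getD page 0 == 1)

-- for i in range(len(sc)): sc1[i] = 0; for j in getinlinks(i, graph): sc1[i] += sc[j]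
def calcSc (sc : List Int) (graph : List (List Int)) : List Int :=
  (List.range sc.length).foldl
    (fun sc1 i =>
      (getinlinksL i graph).foldl
        (fun sc1 j => sc1.set i (sc1.getD i 0 + sc.getD j 0))
        (sc1.set i 0))
    (List.replicate sc.length (0 : Int))

-- ===== PORT B =====
-- totals = {}; for s, row in zip(sc, graph): for i, v in enumerate(row[:len(sc)]):
--   if v == 1: totals[i] = totals.get(i, 0) + s
-- return [totals.get(i, 0) for i in range(len(sc))]
def calcSc_alt (sc : List Int) (graph : List (List Int)) : List Int :=
  let totals : PySem.Dict Int Int :=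
    (sc.zip graph).foldl
      (fun totals p =>
        (PySem.List.enumerate (PySem.List.slice p.2 none (some (sc.length : Int)))).foldl
          (fun t q => if q.2 == 1 then t.insert q.1 (t.getD q.1 0 + p.1) else t)
          totals)
      PySem.Dict.empty
  (List.range sc.length).map (fun (i : Nat) => totals.getD (i : Int) 0)

-- ===== PRECONDITION & SPEC =====
-- Pre_: exactly the inputs on which Python A returns: every row is long enough for the
-- column reads (else graph[i][page] raises IndexError) and every in-link row index j is
-- < len(sc) (else sc[j] raises IndexError).
def Pre_calcSc (sc : List Int) (graph : List (List Int)) : Prop :=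
  (∀ row ∈ graph, sc.length ≤ row.length) ∧
  (∀ j < graph.length, ∀ i < sc.length, (graph.getD j []).getD i 0 = 1 → j < sc.length)
instance (sc : List Int) (graph : List (List Int)) : Decidable (Pre_calcSc sc graph) := by
  unfold Pre_calcSc; infer_instance

def pvWitness_calcSc : List Int × List (List Int) :=
  ([1, 2, 3], [[0, 1, 1], [1, 0, 0], [0, 1, 0]])

def Spec_calcSc (sc : List Int) (graph : List (List Int)) (out : List Int) : Prop := out = calcSc_alt sc graph
instance (sc : List Int) (graph : List (List Int)) (out : List Int) : Decidable (Spec_calcSc sc graph out) := by unfold Spec_calcSc; infer_instance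

-- ===== CLAIM (what is proved, stated in full; the proofs are below) =====
def Claim_equal_calcSc : Prop := ∀ (sc : List Int) (graph : List (List Int)), Dom_calcSc sc graph → Pre_calcSc sc graph → Spec_calcSc sc graph (calcSc sc graph)

-- ===== LEMMAS AND PROOFS =====

-- the per-target closed form both sides are reduced to (guarded column sum over all rows)
def pvSum (sc : List Int) (graph : List (List Int)) (i : Nat) : Int :=
  (List.range graph.length).foldl
    (fun acc j => acc + if (graph.getD j []).getD i 0 == 1 then sc.getD j 0 else 0) 0

-- partial column sum over the first k rows
def pvSumUpto (sc : List Int) (graph : List (List Int)) (k i : Nat) : Int :=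
  (List.range k).foldl
    (fun acc j => acc + if (graph.getD j []).getD i 0 == 1 then sc.getD j 0 else 0) 0

-- invariant-carrying congruence for folds whose steps agree on states satisfying P
theorem foldl_inv_congr (P : List Int → Prop) (f g : List Int → Nat → List Int) :
    ∀ (l : List Nat) (init : List Int), P init →
    (∀ a i, P a → i ∈ l → f a i = g a i) →
    (∀ a i, P a → i ∈ l → P (g a i)) →
    l.foldl f init = l.foldl g init := by
  intro l
  induction l with
  | nil => intro init _ _ _; rfl
  | cons x t ih =>
    intro init hP hfg hPg
    simp only [List.foldl_cons]
    rw [hfg init x hP (by simp)]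
    exact ih (g init x) (hPg init x hP (by simp))
      (fun a i ha hi => hfg a i ha (by simp [hi]))
      (fun a i ha hi => hPg a i ha (by simp [hi]))

-- generic: a fold over range n that at step i sets index i from its current value is a map
theorem foldl_set_range (g : Nat → Int → Int) :
    ∀ (n : Nat) (l : List Int), n ≤ l.length →
    (List.range n).foldl (fun a i => a.set i (g i (a.getD i 0))) l
      = (List.range n).map (fun i => g i (l.getD i 0)) ++ l.drop n := by
  intro n
  induction n with
  | zero => intro l _; simp
  | succ n ih =>
    intro l hl
    rw [List.range_succ, List.foldl_append, List.map_append, ih l (by omega)]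
    have hn : n < l.length := by omega
    have hmaplen : ((List.range n).map (fun i => g i (l.getD i 0))).length = n := by simp
    have hgetD : ((List.range n).map (fun i => g i (l.getD i 0)) ++ l.drop n).getD n 0
        = l.getD n 0 := by
      rw [List.getD_eq_getElem?_getD, List.getElem?_append_right (by omega), hmaplen]
      simp [List.getD_eq_getElem?_getD, hn]
    have hdrop : l.drop n = l[n] :: l.drop (n + 1) := by
      rw [List.drop_eq_getElem_cons hn]
    simp only [List.foldl_cons, List.foldl_nil, hgetD]
    rw [List.set_append_right _ _ (by omega), hmaplen]
    simp only [List.getD_eq_getElem?_getD, List.getElem?_eq_getElem hn, Option.getD_some,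
      List.map_cons, List.map_nil, List.append_assoc,
      List.cons_append, List.nil_append, Nat.sub_self]
    rw [hdrop, List.set_cons_zero]

-- A's inner accumulation into the single cell i collapses to one set
theorem inner_gather (sc : List Int) (i : Nat) :
    ∀ (js : List Nat) (a : List Int) (v : Int), i < a.length →
    js.foldl (fun sc1 j => sc1.set i (sc1.getD i 0 + sc.getD j 0)) (a.set i v)
      = a.set i (js.foldl (fun acc j => acc + sc.getD j 0) v) := by
  intro js
  induction js with
  | nil => intro a v _; simp
  | cons j t ih =>
    intro a v hi
    simp only [List.foldl_cons]
    have h1 : (a.set i v).getD i 0 = v := by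
      rw [List.getD_eq_getElem?_getD]; simp [hi]
    rw [h1, List.set_set]
    exact ih a (v + sc.getD j 0) hi

theorem filter_map_sum (p : Nat → Bool) (f : Nat → Int) :
    ∀ l : List Nat, ((l.filter p).map f).sum = (l.map (fun j => if p j then f j else 0)).sum := by
  intro l
  induction l with
  | nil => rfl
  | cons x t ih =>
    by_cases h : p x
    · simp [h, ih]
    · simp [h, ih]

-- the gather sum over the filtered in-links equals the guarded sum over all rows
theorem gather_eq_pvSum (sc : List Int) (graph : List (List Int)) (i : Nat) :
    (getinlinksL i graph).foldl (fun acc j => acc + sc.getD j 0) 0 = pvSum sc graph i := by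
  unfold getinlinksL pvSum
  rw [PySem.List.foldl_add, PySem.List.foldl_add]
  rw [filter_map_sum (fun j => (graph.getD j []).getD i 0 == 1) (fun j => sc.getD j 0)]

-- A computes the closed form pointwise
theorem calcSc_eq_map (sc : List Int) (graph : List (List Int)) :
    calcSc sc graph = (List.range sc.length).map (pvSum sc graph) := by
  unfold calcSc
  rw [foldl_inv_congr (fun a => a.length = sc.length) _
      (fun a i => a.set i ((fun i (_ : Int) => pvSum sc graph i) i (a.getD i 0)))
      (List.range sc.length) (List.replicate sc.length 0) (by simp)
      (by
        intro a i ha hi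
        simp only [List.mem_range] at hi
        rw [inner_gather sc i _ a 0 (by omega), gather_eq_pvSum])
      (by intro a i ha hi; simp [ha])]
  rw [foldl_set_range (fun i _ => pvSum sc graph i) sc.length _ (by simp)]
  simp

-- B's per-row inner fold touches each dict key at most once: its effect on any key i
theorem rowStep (s : Int) :
    ∀ (r : List Int) (st : Int) (t : PySem.Dict Int Int) (i : Int),
    ((PySem.List.enumerate r st).foldl
        (fun t q => if q.2 == 1 then t.insert q.1 (t.getD q.1 0 + s) else t) t).getD i 0
      = t.getD i 0
        + (if st ≤ i ∧ i < st + r.length ∧ r.getD (i - st).toNat 0 == 1 then s else 0) := by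
  intro r
  induction r with
  | nil =>
    intro st t i
    simp [PySem.List.enumerate]
  | cons x xs ih =>
    intro st t i
    rw [PySem.List.enumerate_cons]
    simp only [List.foldl_cons]
    by_cases hxi : i = st
    · subst hxi
      rw [ih]
      have htail : ¬ (i + 1 ≤ i ∧ i < i + 1 + (xs.length : Int)
          ∧ xs.getD (i - (i + 1)).toNat 0 == 1) := by omega
      rw [if_neg htail]
      have hhead : ((i : Int) - i).toNat = 0 := by omega
      by_cases hx : x == 1
      · simp only [hx, if_pos]
        rw [PySem.Dict.getD_insert, if_pos rfl]
        have hcond : i ≤ i ∧ i < i + ((x :: xs).length : Int)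
            ∧ ((x :: xs).getD ((i : Int) - i).toNat 0 == 1) = true := by
          have hpos : (0 : Int) < ((x :: xs).length : Int) := by exact_mod_cast Nat.succ_pos xs.length
          refine ⟨le_refl _, by omega, ?_⟩
          simpa [hhead] using hx
        rw [if_pos hcond]
        ring
      · simp only [hx, Bool.false_eq_true, if_false]
        simp only [hhead, List.getD_cons_zero, hx, and_false, if_false, add_zero]
        have : ¬ (i ≤ i ∧ i < i + ((x :: xs).length : Int)
            ∧ (x :: xs).getD ((i : Int) - i).toNat 0 == 1) := by
          simp [hhead, hx]
        simp [hhead, hx]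
    · have hstep : (if x == 1 then t.insert st (t.getD st 0 + s) else t).getD i 0
          = t.getD i 0 := by
        by_cases hx : x == 1
        · simp only [hx, if_pos]
          rw [PySem.Dict.getD_insert, if_neg hxi]
        · simp [hx]
      rw [ih, hstep]
      congr 1
      by_cases hlow : st + 1 ≤ i
      · have h1 : ((i : Int) - st).toNat = (i - (st + 1)).toNat + 1 := by omega
        have h2 : (x :: xs).getD ((i : Int) - st).toNat 0
            = xs.getD (i - (st + 1)).toNat 0 := by
          rw [h1]; simp
        simp only [List.length_cons, h2]
        have : (st + 1 ≤ i ∧ i < st + 1 + (xs.length : Int))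
            ↔ (st ≤ i ∧ i < st + ((xs.length : Int) + 1)) := by omega
        by_cases hc : xs.getD (i - (st + 1)).toNat 0 == 1 <;>
          simp [hc, this] <;> push_cast <;> omega
      · have hno1 : ¬ (st + 1 ≤ i ∧ i < st + 1 + (xs.length : Int)
            ∧ xs.getD (i - (st + 1)).toNat 0 == 1) := by omega
        have hno2 : ¬ (st ≤ i ∧ i < st + ((x :: xs).length : Int)
            ∧ (x :: xs).getD ((i : Int) - st).toNat 0 == 1) := by
          intro ⟨ha, _, _⟩; omega
        rw [if_neg hno1, if_neg hno2]

-- the B-side outer fold step, named so the take-induction can speak about it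
def pvBStep (sc : List Int) (totals : PySem.Dict Int Int) (p : Int × List Int) :
    PySem.Dict Int Int :=
  (PySem.List.enumerate (PySem.List.slice p.2 none (some (sc.length : Int)))).foldl
    (fun t q => if q.2 == 1 then t.insert q.1 (t.getD q.1 0 + p.1) else t)
    totals

theorem pvBStep_apply (sc : List Int) (totals : PySem.Dict Int Int) (p : Int × List Int) :
    pvBStep sc totals p
      = (PySem.List.enumerate (PySem.List.slice p.2 none (some (sc.length : Int)))).foldl
          (fun t q => if q.2 == 1 then t.insert q.1 (t.getD q.1 0 + p.1) else t)
          totals := rfl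

-- after folding the first k zipped (score, row) pairs, the dict holds the partial column sums
theorem bfold_take (sc : List Int) (graph : List (List Int))
    (hrow : ∀ row ∈ graph, sc.length ≤ row.length) :
    ∀ k, k ≤ (sc.zip graph).length →
    ∀ i : Nat, i < sc.length →
    (((sc.zip graph).take k).foldl (pvBStep sc) PySem.Dict.empty).getD (i : Int) 0
      = pvSumUpto sc graph k i := by
  intro k
  induction k with
  | zero =>
    intro _ i _
    simp [pvSumUpto, PySem.Dict.getD_empty]
  | succ k ih =>
    intro hk i hi
    have hkz : k < (sc.zip graph).length := by omega
    have hksc : k < sc.length := by simp at hkz; omega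
    have hkg : k < graph.length := by simp at hkz; omega
    have htake : (sc.zip graph).take (k + 1)
        = (sc.zip graph).take k ++ [(sc.zip graph)[k]] := by
      rw [List.take_succ, List.getElem?_eq_getElem hkz]
      rfl
    rw [htake, List.foldl_append]
    simp only [List.foldl_cons, List.foldl_nil]
    have hel : (sc.zip graph)[k] = (sc[k], graph[k]) := List.getElem_zip
    rw [hel, pvBStep_apply]
    have hrlen : sc.length ≤ graph[k].length :=
      hrow _ (List.getElem_mem hkg)
    have hslice : PySem.List.slice graph[k] none (some ((sc.length : Nat) : Int))
        = graph[k].take sc.length := PySem.List.slice_to_natCast _ _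
    rw [hslice, rowStep]
    rw [ih (by omega) i hi]
    have hlen : (graph[k].take sc.length).length = sc.length := by
      simp [hrlen]
    have hgetD : (graph[k].take sc.length).getD (((i : Nat) : Int) - 0).toNat 0
        = (graph.getD k []).getD i 0 := by
      have h1 : (((i : Nat) : Int) - 0).toNat = i := by omega
      have h2 : graph.getD k [] = graph[k] := by
        rw [List.getD_eq_getElem?_getD, List.getElem?_eq_getElem hkg]; rfl
      rw [h1, h2]
      have hig : i < graph[k].length := by omega
      have htk : i < (graph[k].take sc.length).length := by simp; omega
      rw [List.getD_eq_getElem?_getD, List.getD_eq_getElem?_getD,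
        List.getElem?_eq_getElem htk, List.getElem?_eq_getElem hig,
        List.getElem_take]
    have hcond : ((0 : Int) ≤ (i : Int) ∧ (i : Int) < 0 + ((graph[k].take sc.length).length : Int))
        ↔ True := by
      simp [hlen]; exact_mod_cast hi
    have hsucc : pvSumUpto sc graph (k + 1) i
        = pvSumUpto sc graph k i
          + (if (graph.getD k []).getD i 0 == 1 then sc.getD k 0 else 0) := by
      unfold pvSumUpto
      rw [List.range_succ, List.foldl_append]
      simp
    rw [hsucc, hgetD]
    have hsck : sc.getD k 0 = sc[k] := by
      rw [List.getD_eq_getElem?_getD, List.getElem?_eq_getElem hksc]; rfl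
    rw [hsck]
    by_cases hc : (graph.getD k []).getD i 0 == 1
    · rw [if_pos hc, if_pos ⟨by omega, by rw [hlen]; push_cast; omega, hc⟩]
    · rw [if_neg hc, if_neg (by intro ⟨_, _, h⟩; exact hc h), add_zero]

-- under Pre_'s second clause, rows beyond len(sc) contribute nothing to column i
theorem pvSumUpto_stable (sc : List Int) (graph : List (List Int)) (i n : Nat)
    (hi : i < sc.length) (hn : sc.length ≤ n)
    (h2 : ∀ j < graph.length, ∀ i < sc.length, (graph.getD j []).getD i 0 = 1 → j < sc.length) :
    ∀ d, n + d ≤ graph.length → pvSumUpto sc graph (n + d) i = pvSumUpto sc graph n i := by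
  intro d
  induction d with
  | zero => intro _; rfl
  | succ d ih =>
    intro hd
    have hstep : pvSumUpto sc graph (n + d + 1) i
        = pvSumUpto sc graph (n + d) i
          + (if (graph.getD (n + d) []).getD i 0 == 1 then sc.getD (n + d) 0 else 0) := by
      unfold pvSumUpto
      rw [List.range_succ, List.foldl_append]
      simp
    have hzero : ¬ ((graph.getD (n + d) []).getD i 0 == 1) := by
      intro hc
      have := h2 (n + d) (by omega) i hi (by exact eq_of_beq hc)
      omega
    have : n + (d + 1) = n + d + 1 := by omega
    rw [this, hstep, if_neg hzero, add_zero, ih (by omega)]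

-- B computes the closed form pointwise (under Pre_)
theorem calcSc_alt_eq_map (sc : List Int) (graph : List (List Int))
    (hpre : Pre_calcSc sc graph) :
    calcSc_alt sc graph = (List.range sc.length).map (pvSum sc graph) := by
  obtain ⟨h1, h2⟩ := hpre
  have hmain : ∀ i, i < sc.length →
      ((sc.zip graph).foldl (pvBStep sc) PySem.Dict.empty).getD (i : Int) 0
        = pvSum sc graph i := by
    intro i hi
    have hfold : (sc.zip graph).foldl (pvBStep sc) PySem.Dict.empty
        = ((sc.zip graph).take (sc.zip graph).length).foldl (pvBStep sc) PySem.Dict.empty := by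
      rw [List.take_length]
    rw [hfold, bfold_take sc graph h1 (sc.zip graph).length (le_refl _) i hi]
    have hn : (sc.zip graph).length = min sc.length graph.length := List.length_zip
    by_cases hc : graph.length ≤ sc.length
    · have : (sc.zip graph).length = graph.length := by omega
      rw [this]; rfl
    · have hmin : (sc.zip graph).length = sc.length := by omega
      rw [hmin]
      have := pvSumUpto_stable sc graph i sc.length hi (le_refl _) h2
        (graph.length - sc.length) (by omega)
      have heq : sc.length + (graph.length - sc.length) = graph.length := by omega
      rw [heq] at this
      rw [← this]
      rfl
  show (List.range sc.length).map
      (fun (i : Nat) => ((sc.zip graph).foldl (pvBStep sc) PySem.Dict.empty).getD (i : Int) 0)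
    = (List.range sc.length).map (pvSum sc graph)
  exact List.map_congr_left (fun i hi => hmain i (List.mem_range.mp hi))

-- ===== VERDICT (by name: the statement is the Claim_ definition above) =====
theorem calcSc_spec : Claim_equal_calcSc := by
  intro sc graph _ hpre
  unfold Spec_calcSc
  rw [calcSc_eq_map, calcSc_alt_eq_map sc graph hpre]
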